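-- pv_equiv track=rewrite | github.com/jjpeterson90/algo-anagrams-ii | python/anagram2.py | anagrams_for
-- ===== SOURCE A (Python) =====
-- def anagrams_for(word, list_of_words):
-- 	anagrams_found = []
-- 	for this_word in list_of_words:
-- 		test_this_word = list(this_word)
-- 		for letter in word:
-- 			if letter in test_this_word:
-- 					test_this_word.remove(letter)
-- 		if len(test_this_word) == 0:
-- 				anagrams_found.append(this_word)
-- 	return anagrams_found
-- ===== SOURCE B (Python) =====
-- def anagrams_for(word, list_of_words):
--     # Count word's letters once; a candidate qualifies iff each of its letter
--     # counts is <= the corresponding count in word (sub-multiset test).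
--     have = {}
--     for c in word:
--         have[c] = have.get(c, 0) + 1
--     anagrams_found = []
--     for this_word in list_of_words:
--         need = {}
--         for c in this_word:
--             need[c] = need.get(c, 0) + 1
--         if all(n <= have.get(c, 0) for c, n in need.items()):
--             anagrams_found.append(this_word)
--     return anagrams_found
-- ===== Notes on version B (the rewrite author's own statement) =====
-- stated objective: faster
-- what changed: A repeatedly scans and destructively removes letters from a copy of each candidate (quadratic per candidate); B builds a letter-count dict for word once and for each candidate compares its letter counts against it in one pass.
import Mathlib
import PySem

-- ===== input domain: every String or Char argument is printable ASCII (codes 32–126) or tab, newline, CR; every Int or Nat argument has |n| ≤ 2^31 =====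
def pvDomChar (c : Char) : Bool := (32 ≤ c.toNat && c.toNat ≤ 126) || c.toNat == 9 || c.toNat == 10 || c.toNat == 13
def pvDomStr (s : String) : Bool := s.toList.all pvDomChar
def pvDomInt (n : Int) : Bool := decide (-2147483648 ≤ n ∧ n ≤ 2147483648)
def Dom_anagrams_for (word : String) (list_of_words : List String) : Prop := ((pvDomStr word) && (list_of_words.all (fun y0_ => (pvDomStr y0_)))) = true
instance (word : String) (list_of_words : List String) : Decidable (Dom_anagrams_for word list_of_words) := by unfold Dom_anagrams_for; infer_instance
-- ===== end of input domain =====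

-- ===== PORT A =====
-- B counts letters in a dict once per string instead of A's repeated scan-and-remove; faster.
def anagrams_for (word : String) (list_of_words : List String) : List String :=
  list_of_words.foldl (fun anagrams_found this_word =>
    let test_this_word :=
      word.toList.foldl (fun test letter =>
        if letter ∈ test then (PySem.List.remove? test letter).getD test else test)
        this_word.toList
    if test_this_word.length = 0 then anagrams_found ++ [this_word] else anagrams_found) []

-- ===== PORT B =====
def anagrams_for_alt (word : String) (list_of_words : List String) : List String :=
  let have_ := word.toList.foldl (fun d c => d.insert c (d.getD c 0 + 1)) (PySem.Dict.empty : PySem.Dict Char Int)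
  list_of_words.foldl (fun anagrams_found this_word =>
    let need := this_word.toList.foldl (fun d c => d.insert c (d.getD c 0 + 1)) (PySem.Dict.empty : PySem.Dict Char Int)
    if need.items.all (fun p => p.2 ≤ have_.getD p.1 0) then anagrams_found ++ [this_word]
    else anagrams_found) []

-- ===== PRECONDITION & SPEC =====
def Spec_anagrams_for (word : String) (list_of_words : List String) (out : List String) : Prop := out = anagrams_for_alt word list_of_words
instance (word : String) (list_of_words : List String) (out : List String) : Decidable (Spec_anagrams_for word list_of_words out) := by unfold Spec_anagrams_for; infer_instance

-- ===== CLAIM (what is proved, stated in full; the proofs are below) =====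
def Claim_equal_anagrams_for : Prop := ∀ (word : String) (list_of_words : List String), Dom_anagrams_for word list_of_words → Spec_anagrams_for word list_of_words (anagrams_for word list_of_words)

-- ===== LEMMAS AND PROOFS =====

-- ===== VERDICT (by name: the statement is the Claim_ definition above) =====
-- count of c after A's inner loop: truncated subtraction of word's count from the candidate's
theorem pv_count_fold (ws : List Char) (t : List Char) (c : Char) :
    (ws.foldl (fun test letter =>
        if letter ∈ test then (PySem.List.remove? test letter).getD test else test) t).count c
      = t.count c - ws.count c := by
  induction ws generalizing t with
  | nil => simp
  | cons l ws ih =>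
    simp only [List.foldl_cons, List.count_cons, ih]
    by_cases h : l ∈ t
    · rw [if_pos h, PySem.List.remove?_eq_some_erase t l h, Option.getD_some, List.count_erase]
      by_cases hc : l = c
      · subst hc
        simp only [beq_self_eq_true, if_true]
        omega
      · simp only [beq_iff_eq, if_neg hc]
        omega
    · rw [if_neg h]
      by_cases hc : l = c
      · subst hc
        have h0 : t.count l = 0 := List.count_eq_zero.mpr h
        simp [h0]
      · simp only [beq_iff_eq, if_neg hc]
        omega

theorem pv_cond_iff (word w : String) :
    ((word.toList.foldl (fun test letter =>
        if letter ∈ test then (PySem.List.remove? test letter).getD test else test)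
        w.toList).length = 0)
      ↔ ((w.toList.foldl (fun d c => d.insert c (d.getD c 0 + 1)) (PySem.Dict.empty : PySem.Dict Char Int)).items.all
          (fun p => p.2 ≤ (word.toList.foldl (fun d c => d.insert c (d.getD c 0 + 1))
            PySem.Dict.empty).getD p.1 0) = true) := by
  rw [PySem.Dict.foldl_insert_getD_add_one_eq_counter, PySem.Dict.foldl_insert_getD_add_one_eq_counter,
    PySem.Dict.items_counter, List.length_eq_zero_iff]
  constructor
  · intro h
    simp only [List.all_eq_true, List.mem_map]
    rintro p ⟨k, hk, rfl⟩
    have hc := pv_count_fold word.toList w.toList k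
    rw [h] at hc
    simp at hc
    rw [PySem.Dict.getD_counter]
    simp only [decide_eq_true_eq]
    exact_mod_cast by omega
  · intro h
    have : ∀ c, ((word.toList.foldl (fun test letter =>
        if letter ∈ test then (PySem.List.remove? test letter).getD test else test)
        w.toList).count c) = 0 := by
      intro c
      rw [pv_count_fold]
      by_cases hm : c ∈ w.toList
      · have hms : c ∈ PySem.Set.ofList w.toList := (PySem.Set.mem_ofList _ _).mpr hm
        simp only [List.all_eq_true, List.mem_map] at h
        have := h (c, (w.toList.count c : Int)) ⟨c, hms, rfl⟩
        rw [PySem.Dict.getD_counter] at this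
        simp only [decide_eq_true_eq] at this
        have : w.toList.count c ≤ word.toList.count c := by exact_mod_cast this
        omega
      · have : w.toList.count c = 0 := List.count_eq_zero.mpr hm
        omega
    exact List.eq_nil_iff_forall_not_mem.mpr (fun c hc =>
      (List.count_eq_zero.mp (this c)) (by exact hc))

theorem pv_foldl_eq (word : String) (list_of_words : List String) :
    anagrams_for word list_of_words = anagrams_for_alt word list_of_words := by
  unfold anagrams_for anagrams_for_alt
  simp only
  induction list_of_words using List.reverseRecOn with
  | nil => rfl
  | append_singleton xs w ih =>
    rw [List.foldl_append, List.foldl_append, ← ih]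
    simp only [List.foldl_cons, List.foldl_nil]
    by_cases h : (word.toList.foldl (fun test letter =>
        if letter ∈ test then (PySem.List.remove? test letter).getD test else test)
        w.toList).length = 0
    · rw [if_pos h, if_pos ((pv_cond_iff word w).mp h)]
    · rw [if_neg h, if_neg (fun hc => h ((pv_cond_iff word w).mpr hc))]

theorem anagrams_for_spec : Claim_equal_anagrams_for :=
  fun word list_of_words _ => pv_foldl_eq word list_of_words
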